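-- pv_equiv track=rewrite | github.com/Gothdn/HackerRankChallenges | Pylons.py | pylons
-- ===== SOURCE A (Python) =====
-- def pylons(k, arr):
--     n = len(arr)
--     last = []
--     pos = -1
--     for i in range (0, n):
--         if arr[i] == 1:
--             pos = i
--         last.append(pos)
--
--     c = 0
--     left = 0
--     while left < n:
--         right = min(left + k - 1, n - 1)
--         if (last[right] + k - 1 < left) | (last[right] == -1):
--             return -1
--         c += 1
--         left = last[right] + k
--     return c
-- ===== SOURCE B (Python) =====
-- def pylons(k, arr):
--     n = len(arr)
--     c = 0
--     left = 0
--     while left < n: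
--         lo = max(0, left - k + 1)
--         i = min(left + k - 1, n - 1)
--         while i >= lo and arr[i] != 1:
--             i -= 1
--         if i < lo:
--             return -1
--         c += 1
--         left = i + k
--     return c
-- ===== Notes on version B (the rewrite author's own statement) =====
-- stated objective: simpler
-- what changed: Drops the precomputed last-seen-plant array entirely: one greedy loop scans each window [max(0,left-k+1), min(left+k-1,n-1)] backward in place for the rightmost city with a plant, using O(1) extra memory.
import Mathlib
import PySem

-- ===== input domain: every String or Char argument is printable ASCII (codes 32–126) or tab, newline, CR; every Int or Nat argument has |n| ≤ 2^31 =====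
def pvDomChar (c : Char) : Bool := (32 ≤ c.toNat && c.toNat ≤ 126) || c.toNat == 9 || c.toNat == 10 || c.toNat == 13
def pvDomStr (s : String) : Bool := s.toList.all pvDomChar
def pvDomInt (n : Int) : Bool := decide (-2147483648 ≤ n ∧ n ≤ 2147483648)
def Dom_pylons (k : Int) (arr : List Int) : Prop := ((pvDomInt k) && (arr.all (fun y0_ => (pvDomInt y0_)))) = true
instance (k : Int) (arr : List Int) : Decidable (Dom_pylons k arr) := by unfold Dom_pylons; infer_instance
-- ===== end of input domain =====

-- B replaces A's precomputed last-plant array by a single greedy loop that scans each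
-- coverage window backward in place (O(1) extra space); objective: simpler.

-- ===== PORT A =====
-- for i in range(0,n): if arr[i]==1: pos=i; last.append(pos)   — fold over enumerate
def pylonsBuild (arr : List Int) : List Int × Int :=
  (PySem.List.enumerate arr 0).foldl
    (fun (st : List Int × Int) (p : Int × Int) =>
      let pos := if p.2 = 1 then p.1 else st.2
      (st.1 ++ [pos], pos))
    ([], -1)

-- the while loop; `none` from pyGet? is Python's IndexError, excluded by Pre_pylons
def pylonsLoop (k : Int) (last : List Int) (n : Int) (c left : Int) : Int :=
  if _h : left < n then
    let right := min (left + k - 1) (n - 1)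
    match PySem.List.pyGet? last right with
    | none => -1
    | some lr =>
      if _h2 : lr + k - 1 < left ∨ lr = -1 then -1
      else pylonsLoop k last n (c + 1) (lr + k)
  else c
termination_by (n - left).toNat
decreasing_by omega

def pylons (k : Int) (arr : List Int) : Int :=
  pylonsLoop k (pylonsBuild arr).1 (arr.length : Int) 0 0

-- ===== PORT B =====
-- inner `while i >= lo and arr[i] != 1: i -= 1`; every access has 0 ≤ lo ≤ i < n,
-- so pyGetD's default is never read (exact there)
def pylonsScan (arr : List Int) (lo i : Int) : Int :=
  if _h : lo ≤ i ∧ PySem.List.pyGetD arr i 0 ≠ 1 then pylonsScan arr lo (i - 1) else i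
termination_by (i + 1 - lo).toNat
decreasing_by omega

def pylonsAltLoop (k : Int) (arr : List Int) (n : Int) (c left : Int) : Int :=
  if _h : left < n then
    if _h2 : pylonsScan arr (max 0 (left - k + 1)) (min (left + k - 1) (n - 1))
               < max 0 (left - k + 1) then -1
    else pylonsAltLoop k arr n (c + 1)
           (pylonsScan arr (max 0 (left - k + 1)) (min (left + k - 1) (n - 1)) + k)
  else c
termination_by (n - left).toNat
decreasing_by omega

def pylons_alt (k : Int) (arr : List Int) : Int :=
  pylonsAltLoop k arr (arr.length : Int) 0 0

-- ===== PRECONDITION & SPEC =====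
-- Pre_ excludes exactly the inputs where A raises IndexError (non-empty arr with
-- k + len(arr) ≤ 0: last[right] with right < -n); A returns on everything Pre_ admits.
def Pre_pylons (k : Int) (arr : List Int) : Prop :=
  arr = [] ∨ 0 < k + (arr.length : Int)
instance (k : Int) (arr : List Int) : Decidable (Pre_pylons k arr) := by
  unfold Pre_pylons; infer_instance

def pvWitness_pylons : Int × List Int := (2, [0, 1, 0, 1])

def Spec_pylons (k : Int) (arr : List Int) (out : Int) : Prop := out = pylons_alt k arr
instance (k : Int) (arr : List Int) (out : Int) : Decidable (Spec_pylons k arr out) := by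
  unfold Spec_pylons; infer_instance

-- ===== CLAIM (what is proved, stated in full; the proofs are below) =====
def Claim_equal_pylons : Prop :=
  ∀ (k : Int) (arr : List Int), Dom_pylons k arr → Pre_pylons k arr →
    Spec_pylons k arr (pylons k arr)

-- ===== LEMMAS AND PROOFS =====

-- rightmost index ≤ j holding a 1, or -1 (the value A's `last[j]` stores)
def lastVal (arr : List Int) (j : Int) : Int :=
  if _h : j < 0 then -1
  else if arr.getD j.toNat 0 = 1 then j else lastVal arr (j - 1)
termination_by (j + 1).toNat
decreasing_by omega

def lastFrom (xs : List Int) (s pos : Int) : List Int :=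
  match xs with
  | [] => []
  | x :: t => (if x = 1 then s else pos) :: lastFrom t (s + 1) (if x = 1 then s else pos)

def lastPos (xs : List Int) (s pos : Int) : Int :=
  match xs with
  | [] => pos
  | x :: t => lastPos t (s + 1) (if x = 1 then s else pos)

lemma build_eq (xs : List Int) : ∀ (s : Int) (acc : List Int) (pos : Int),
    (PySem.List.enumerate xs s).foldl
      (fun (st : List Int × Int) (p : Int × Int) =>
        let q := if p.2 = 1 then p.1 else st.2
        (st.1 ++ [q], q)) (acc, pos)
      = (acc ++ lastFrom xs s pos, lastPos xs s pos) := by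
  induction xs with
  | nil => intro s acc pos; simp [PySem.List.enumerate_nil, lastFrom, lastPos]
  | cons x t ih =>
      intro s acc pos
      simp only [PySem.List.enumerate_cons, List.foldl_cons, lastFrom, lastPos, ih]
      simp

lemma lastVal_le (arr : List Int) (j : Int) : lastVal arr j = -1 ∨ (0 ≤ lastVal arr j ∧ lastVal arr j ≤ j) := by
  by_cases h : j < 0
  · left; rw [lastVal]; simp [h]
  · rw [lastVal]
    simp only [h, dite_false]
    split
    · right; omega
    · rcases lastVal_le arr (j - 1) with h1 | h1
      · left; exact h1
      · right; omega
termination_by (j + 1).toNat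
decreasing_by omega

lemma lastVal_append_lt (xs : List Int) (x : Int) (j : Int) (hj : j < (xs.length : Int)) :
    lastVal (xs ++ [x]) j = lastVal xs j := by
  by_cases h : j < 0
  · conv_lhs => rw [lastVal]
    conv_rhs => rw [lastVal]
    simp [h]
  · conv_lhs => rw [lastVal]
    conv_rhs => rw [lastVal]
    have hget : (xs ++ [x]).getD j.toNat 0 = xs.getD j.toNat 0 := by
      have : j.toNat < xs.length := by omega
      simp [List.getD, List.getElem?_append_left this]
    rw [hget]
    simp only [h, dite_false]
    split
    · rfl
    · exact lastVal_append_lt xs x (j - 1) (by omega)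

termination_by (j + 1).toNat
decreasing_by omega

lemma lastFrom_append (xs : List Int) (x : Int) : ∀ (s pos : Int),
    lastFrom (xs ++ [x]) s pos
      = lastFrom xs s pos ++ [if x = 1 then s + (xs.length : Int) else lastPos xs s pos] := by
  induction xs with
  | nil => intro s pos; simp [lastFrom, lastPos]
  | cons y t ih =>
      intro s pos
      simp only [List.cons_append, lastFrom, lastPos, ih, List.length_cons]
      congr 2
      split
      · push_cast; ring
      · rfl

lemma lastPos_append (xs : List Int) (x : Int) : ∀ (s pos : Int),
    lastPos (xs ++ [x]) s pos = if x = 1 then s + (xs.length : Int) else lastPos xs s pos := by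
  induction xs with
  | nil => intro s pos; simp [lastPos]
  | cons y t ih =>
      intro s pos
      simp only [List.cons_append, lastPos, ih, List.length_cons]
      split
      · push_cast; ring
      · rfl

lemma lastFrom_spec (xs : List Int) :
    lastFrom xs 0 (-1) = (List.range xs.length).map (fun m : Nat => lastVal xs (m : Int)) ∧
    lastPos xs 0 (-1) = lastVal xs ((xs.length : Int) - 1) := by
  induction xs using List.reverseRecOn with
  | nil =>
      constructor
      · simp [lastFrom]
      · simp [lastPos]; rw [lastVal]; simp
  | append_singleton t x ih =>
      obtain ⟨ih1, ih2⟩ := ih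
      have hlast : lastVal (t ++ [x]) (t.length : Int)
          = if x = 1 then (t.length : Int) else lastPos t 0 (-1) := by
        rw [lastVal]
        have h0 : ¬ ((t.length : Int) < 0) := by omega
        have hget : (t ++ [x]).getD ((t.length : Int)).toNat 0 = x := by
          simp
        simp only [h0, dite_false, hget]
        split
        · rfl
        · rw [ih2]
          have : (t.length : Int) - 1 < (t.length : Int) := by omega
          rw [lastVal_append_lt t x _ this]
      constructor
      · rw [lastFrom_append, ih1]
        rw [List.length_append, List.length_singleton, List.range_succ, List.map_append]
        congr 1
        · apply List.map_congr_left
          intro m hm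
          rw [List.mem_range] at hm
          exact (lastVal_append_lt t x (m : Int) (by omega)).symm
        · simp only [List.map_cons, List.map_nil]
          congr 1
          rw [hlast]
          split
          · ring
          · rfl
      · rw [lastPos_append, List.length_append, List.length_singleton]
        push_cast
        rw [show (t.length : Int) + 1 - 1 = (t.length : Int) by ring, hlast]
        split
        · ring
        · rfl

-- last[j] (with Python's negative-index wrap) reads lastVal
lemma getLast_eq (arr : List Int) (j : Int)
    (h1 : -(arr.length : Int) ≤ j) (h2 : j < (arr.length : Int)) :
    PySem.List.pyGet? (pylonsBuild arr).1 j
      = some (lastVal arr (if j < 0 then (arr.length : Int) + j else j)) := by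
  have hb : (pylonsBuild arr).1 = (List.range arr.length).map (fun m : Nat => lastVal arr (m : Int)) := by
    unfold pylonsBuild
    rw [build_eq]
    simpa using (lastFrom_spec arr).1
  have hlen : ((pylonsBuild arr).1).length = arr.length := by rw [hb]; simp
  by_cases hj : j < 0
  · have hidx : arr.length - (-j).toNat < arr.length := by omega
    have hstep : PySem.List.pyGet? (pylonsBuild arr).1 j
        = ((pylonsBuild arr).1)[arr.length - (-j).toNat]? := by
      conv_lhs => rw [show j = -(((-j).toNat : Nat) : Int) by omega]
      rw [PySem.List.pyGet?_neg_natCast _ _ (by omega) (by omega), hlen]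
    rw [hstep, hb, List.getElem?_map, List.getElem?_range hidx]
    simp only [Option.map_some, Option.some_inj]
    congr 1
    simp only [hj, if_true]
    omega
  · have hstep : PySem.List.pyGet? (pylonsBuild arr).1 j
        = ((pylonsBuild arr).1)[j.toNat]? := by
      conv_lhs => rw [show j = ((j.toNat : Nat) : Int) by omega]
      rw [PySem.List.pyGet?_natCast]
    rw [hstep, hb, List.getElem?_map, List.getElem?_range (by omega)]
    simp only [Option.map_some, Option.some_inj]
    congr 1
    simp only [hj, if_false]
    omega

lemma scan_eq (arr : List Int) (lo i : Int) (hlo : 0 ≤ lo) :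
    pylonsScan arr lo i
      = if lastVal arr i < lo then min i (lo - 1) else lastVal arr i := by
  by_cases hi : i < lo
  · rw [pylonsScan, dif_neg (by rintro ⟨h, _⟩; omega)]
    have hv := lastVal_le arr i
    rw [if_pos (by omega)]
    omega
  · rw [not_lt] at hi
    have hget : PySem.List.pyGetD arr i 0 = arr.getD i.toNat 0 := by
      conv_lhs => rw [show i = ((i.toNat : Nat) : Int) by omega]
      rw [PySem.List.pyGetD_natCast]
    by_cases hone : arr.getD i.toNat 0 = 1
    · rw [pylonsScan, dif_neg (by rintro ⟨_, hne⟩; rw [hget] at hne; exact hne hone)]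
      have hv : lastVal arr i = i := by
        rw [lastVal]; simp only [show ¬ (i < 0) by omega, dite_false, hone, if_true]
      rw [hv, if_neg (by omega)]
    · rw [pylonsScan, dif_pos ⟨hi, by rw [hget]; exact hone⟩]
      have hv : lastVal arr i = lastVal arr (i - 1) := by
        rw [lastVal]; simp only [show ¬ (i < 0) by omega, dite_false, hone, if_false]
      rw [scan_eq arr lo (i - 1) hlo, hv]
      split
      · omega
      · rfl
termination_by (i + 1 - lo).toNat
decreasing_by omega

-- main loop equivalence for k ≥ 1
lemma loop_eq (k : Int) (arr : List Int) (hk : 1 ≤ k) (left c : Int) (hl : 0 ≤ left) :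
    pylonsLoop k (pylonsBuild arr).1 (arr.length : Int) c left
      = pylonsAltLoop k arr (arr.length : Int) c left := by
  rw [pylonsLoop, pylonsAltLoop]
  by_cases h : left < (arr.length : Int)
  · rw [dif_pos h, dif_pos h]
    dsimp only
    have hr1 : 0 ≤ min (left + k - 1) ((arr.length : Int) - 1) := by omega
    have hr2 : min (left + k - 1) ((arr.length : Int) - 1) < (arr.length : Int) := by omega
    rw [getLast_eq arr _ (by omega) hr2, if_neg (show ¬ (min (left + k - 1) ((arr.length : Int) - 1) < 0) by omega),
        scan_eq arr (max 0 (left - k + 1)) _ (by omega)]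
    dsimp only
    have hvle := lastVal_le arr (min (left + k - 1) ((arr.length : Int) - 1))
    generalize hgen : lastVal arr (min (left + k - 1) ((arr.length : Int) - 1)) = v at hvle ⊢
    by_cases hfail : v + k - 1 < left ∨ v = -1
    · rw [dif_pos hfail, if_pos (show v < max 0 (left - k + 1) by omega),
          dif_pos (by omega)]
    · rw [dif_neg hfail, if_neg (show ¬ (v < max 0 (left - k + 1)) by omega),
          dif_neg (by omega)]
      exact loop_eq k arr hk (v + k) (c + 1) (by omega)
  · rw [dif_neg h, dif_neg h]
termination_by ((arr.length : Int) - left).toNat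
decreasing_by omega

-- for k ≤ 0 inside Pre_, A's loop always returns -1 (fuel-indexed induction)
lemma loopA_neg_aux (k : Int) (arr : List Int) (hk : k ≤ 0) (hkn : 1 ≤ k + (arr.length : Int)) :
    ∀ (m : Nat) (left c : Int), ((arr.length : Int) - left).toNat ≤ m → 0 ≤ left →
      left < (arr.length : Int) →
      pylonsLoop k (pylonsBuild arr).1 (arr.length : Int) c left = -1 := by
  intro m
  induction m with
  | zero => intro left c hm hl hln; omega
  | succ m ih =>
      intro left c hm hl hln
      rw [pylonsLoop]
      simp only [hln, dite_true]
      set n : Int := (arr.length : Int) with hn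
      have hr1 : -n ≤ min (left + k - 1) (n - 1) := by omega
      have hr2 : min (left + k - 1) (n - 1) < n := by omega
      rw [getLast_eq arr _ hr1 hr2]
      set right := min (left + k - 1) (n - 1) with hright
      set j := (if right < 0 then n + right else right) with hj
      set v := lastVal arr j with hv
      have hjlt : j < n := by omega
      have hvle := lastVal_le arr j
      dsimp only
      by_cases hfail : v + k - 1 < left ∨ v = -1
      · rw [dif_pos hfail]
      · rw [dif_neg hfail]
        exact ih (v + k) (c + 1) (by omega) (by omega) (by omega)

lemma loopA_neg (k : Int) (arr : List Int) (hk : k ≤ 0) (hkn : 1 ≤ k + (arr.length : Int))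
    (left c : Int) (hl : 0 ≤ left) (hln : left < (arr.length : Int)) :
    pylonsLoop k (pylonsBuild arr).1 (arr.length : Int) c left = -1 :=
  loopA_neg_aux k arr hk hkn ((arr.length : Int) - left).toNat left c le_rfl hl hln

-- for k ≤ 0 on non-empty arr, B returns -1 at once (empty window)
lemma loopB_neg (k : Int) (arr : List Int) (hk : k ≤ 0) (hn : 0 < (arr.length : Int)) :
    pylonsAltLoop k arr (arr.length : Int) 0 0 = -1 := by
  rw [pylonsAltLoop]
  simp only [hn, dite_true]
  set n : Int := (arr.length : Int) with hne
  have hlo : (0 : Int) ≤ max 0 (0 - k + 1) := by omega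
  rw [scan_eq arr _ _ hlo]
  have hvle := lastVal_le arr (min (0 + k - 1) (n - 1))
  have hcond : lastVal arr (min (0 + k - 1) (n - 1)) < max 0 (0 - k + 1) := by omega
  simp only [hcond, if_true]
  have : min (min (0 + k - 1) (n - 1)) (max 0 (0 - k + 1) - 1) < max 0 (0 - k + 1) := by omega
  simp only [this, dite_true]

-- ===== VERDICT (by name: the statement is the Claim_ definition above) =====
theorem pylons_spec : Claim_equal_pylons := by
  intro k arr _hdom hpre
  unfold Spec_pylons pylons pylons_alt
  by_cases hk : 1 ≤ k
  · exact loop_eq k arr hk 0 0 le_rfl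
  · rw [not_le] at hk
    rcases hpre with hnil | hpos
    · subst hnil
      rw [pylonsLoop, pylonsAltLoop]; simp
    · have hn : 0 < (arr.length : Int) := by omega
      rw [loopA_neg k arr (by omega) hpos 0 0 le_rfl hn,
          loopB_neg k arr (by omega) hn]
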